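-- pv_equiv track=rewrite | github.com/Juan961/Corte2_99461 | TareaS11/utils/__init__.py | get_max_position_from_matrix
-- ===== SOURCE A (Python) =====
-- from typing import List
--
-- def get_max_position_from_matrix(matrix:List[List[int]]):
--     index_column_max_of_every_row = []
--     max_of_every_row = []
--
--     for row in matrix:
--         max_value = max(row)
--         index_column_max_of_every_row.append( row.index(max_value) )
--         max_of_every_row.append( max_value )
--
--     num_max = max(max_of_every_row)
--     index_max = max_of_every_row.index(num_max)
--
--     row_max = index_max
--     column_max = index_column_max_of_every_row[index_max]
--
--     return row_max, column_max
-- ===== SOURCE B (Python) =====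
-- from typing import List
--
-- def get_max_position_from_matrix(matrix: List[List[int]]):
--     best = None  # (value, row, col)
--     for i, row in enumerate(matrix):
--         m = max(row)
--         if best is None or m > best[0]:
--             best = (m, i, row.index(m))
--     if best is None:
--         raise ValueError("max() arg is an empty sequence")
--     return best[1], best[2]
-- ===== Notes on version B (the rewrite author's own statement) =====
-- stated objective: simpler
-- what changed: B replaces A's three-list materialize-then-search (build per-row max and argmax lists, then max+index over the max list and a final lookup) with a single fused pass keeping only the running best (value, row, col); strict > and row.index preserve A's first-row/first-column tie-breaking.
import Mathlib
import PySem

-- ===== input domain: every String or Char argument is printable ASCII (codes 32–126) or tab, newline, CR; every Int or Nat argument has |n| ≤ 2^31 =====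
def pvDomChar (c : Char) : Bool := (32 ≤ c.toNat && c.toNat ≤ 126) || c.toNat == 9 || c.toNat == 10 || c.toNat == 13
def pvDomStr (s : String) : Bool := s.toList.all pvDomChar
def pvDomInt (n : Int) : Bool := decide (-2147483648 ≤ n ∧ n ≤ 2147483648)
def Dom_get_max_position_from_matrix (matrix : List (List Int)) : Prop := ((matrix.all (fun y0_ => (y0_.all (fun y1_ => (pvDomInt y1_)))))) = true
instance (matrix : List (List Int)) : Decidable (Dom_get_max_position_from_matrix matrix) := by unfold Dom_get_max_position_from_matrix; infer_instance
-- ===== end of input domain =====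

-- B is the same scan written as a single fused pass keeping only the running best
-- (value, row, col) instead of materializing three lists; return value only.

-- ===== PORT A =====
-- max(row): on an empty row Python raises, which Pre_ excludes; .getD 0 is the off-domain default
def pyMaxD (row : List Int) : Int := (PySem.List.max? row (fun x => x)).getD 0
-- row.index(v): v = max(row) is always present on-domain; .getD 0 is the off-domain default
def pyIdxD (row : List Int) (v : Int) : Int := ((PySem.List.index? row v).getD 0 : Nat)

def get_max_position_from_matrix (matrix : List (List Int)) : Int × Int :=
  -- (index_column_max_of_every_row, max_of_every_row) built by the for-loop
  let st := matrix.foldl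
    (fun (acc : List Int × List Int) row =>
      let max_value := pyMaxD row
      (acc.1 ++ [pyIdxD row max_value], acc.2 ++ [max_value]))
    ([], [])
  let num_max := (PySem.List.max? st.2 (fun x => x)).getD 0
  let index_max : Nat := (PySem.List.index? st.2 num_max).getD 0
  let row_max : Int := (index_max : Int)
  let column_max : Int := (PySem.List.pyGet? st.1 (index_max : Int)).getD 0
  (row_max, column_max)

-- ===== PORT B =====
def get_max_position_from_matrix_alt (matrix : List (List Int)) : Int × Int :=
  let best := (PySem.List.enumerate matrix 0).foldl
    (fun (best : Option (Int × Int × Int)) p =>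
      let m := pyMaxD p.2
      match best with
      | none => some (m, p.1, pyIdxD p.2 m)
      | some b => if m > b.1 then some (m, p.1, pyIdxD p.2 m) else some b)
    none
  match best with
  | none => (0, 0)  -- Python raises ValueError here (empty matrix); excluded by Pre_
  | some b => (b.2.1, b.2.2)

-- ===== PRECONDITION & SPEC =====
-- A raises ValueError (max of an empty sequence) on an empty matrix or on any empty row.
def Pre_get_max_position_from_matrix (matrix : List (List Int)) : Prop :=
  matrix ≠ [] ∧ ∀ row ∈ matrix, row ≠ []
instance (matrix : List (List Int)) : Decidable (Pre_get_max_position_from_matrix matrix) := by unfold Pre_get_max_position_from_matrix; infer_instance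
def pvWitness_get_max_position_from_matrix : List (List Int) := [[1, 5], [3, 2]]
def Spec_get_max_position_from_matrix (matrix : List (List Int)) (out : Int × Int) : Prop := out = get_max_position_from_matrix_alt matrix
instance (matrix : List (List Int)) (out : Int × Int) : Decidable (Spec_get_max_position_from_matrix matrix out) := by unfold Spec_get_max_position_from_matrix; infer_instance

-- ===== CLAIM (what is proved, stated in full; the proofs are below) =====
def Claim_equal_get_max_position_from_matrix : Prop := ∀ (matrix : List (List Int)), Dom_get_max_position_from_matrix matrix → Pre_get_max_position_from_matrix matrix → Spec_get_max_position_from_matrix matrix (get_max_position_from_matrix matrix)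

-- ===== LEMMAS AND PROOFS =====

-- A's loop builds exactly the two mapped lists.
theorem foldA_eq (matrix : List (List Int)) (a b : List Int) :
    matrix.foldl
      (fun (acc : List Int × List Int) row =>
        let max_value := pyMaxD row
        (acc.1 ++ [pyIdxD row max_value], acc.2 ++ [max_value]))
      (a, b)
    = (a ++ matrix.map (fun row => pyIdxD row (pyMaxD row)), b ++ matrix.map pyMaxD) := by
  induction matrix generalizing a b with
  | nil => simp
  | cons r t ih => simp [List.foldl_cons, ih]

-- B's fold step.
def stepB (best : Option (Int × Int × Int)) (p : Int × List Int) : Option (Int × Int × Int) :=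
  let m := pyMaxD p.2
  match best with
  | none => some (m, p.1, pyIdxD p.2 m)
  | some b => if m > b.1 then some (m, p.1, pyIdxD p.2 m) else some b

-- A's answer expressed from the two mapped lists.
def aNum (matrix : List (List Int)) : Int :=
  (PySem.List.max? (matrix.map pyMaxD) (fun x => x)).getD 0
def aIdx (matrix : List (List Int)) : Nat :=
  (PySem.List.index? (matrix.map pyMaxD) (aNum matrix)).getD 0
def aCol (matrix : List (List Int)) : Int :=
  (PySem.List.pyGet? (matrix.map (fun row => pyIdxD row (pyMaxD row))) ((aIdx matrix : Int))).getD 0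

theorem max?_id_append_singleton (M : List Int) (hM : M ≠ []) (m : Int) :
    PySem.List.max? (M ++ [m]) (fun x => x)
      = some (max ((PySem.List.max? M (fun x => x)).getD 0) m) := by
  obtain ⟨h, t, rfl⟩ := List.exists_cons_of_ne_nil hM
  simp [PySem.List.max?_id_cons, List.foldl_append]

theorem bfold_eq (matrix : List (List Int)) (h : matrix ≠ []) :
    (PySem.List.enumerate matrix 0).foldl stepB none
      = some (aNum matrix, (aIdx matrix : Int), aCol matrix) := by
  induction matrix using List.reverseRecOn with
  | nil => exact absurd rfl h
  | append_singleton xs r ih =>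
    rcases eq_or_ne xs [] with rfl | hxs
    · simp [PySem.List.enumerate, stepB, aNum, aIdx, aCol,
        PySem.List.pyGet?, PySem.List.pyIdx?, PySem.List.max?_id_cons]
    · rw [PySem.List.enumerate_append, List.foldl_append, ih hxs]
      -- facts about xs
      have hMne : xs.map pyMaxD ≠ [] := by simp [hxs]
      obtain ⟨N, hN⟩ : ∃ N, PySem.List.max? (xs.map pyMaxD) (fun x => x) = some N := by
        cases hmx : PySem.List.max? (xs.map pyMaxD) (fun x => x) with
        | none => exact absurd ((PySem.List.max?_eq_none_iff _ _).mp hmx) hMne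
        | some N => exact ⟨N, rfl⟩
      have hNmem : N ∈ xs.map pyMaxD := PySem.List.max?_mem hN
      have hNmax : ∀ y ∈ xs.map pyMaxD, y ≤ N := by
        intro y hy; simpa using PySem.List.max?_isMax hN y hy
      have hnum : aNum xs = N := by unfold aNum; rw [hN]; rfl
      obtain ⟨k, hk⟩ : ∃ k, PySem.List.index? (xs.map pyMaxD) N = some k := by
        cases hix : PySem.List.index? (xs.map pyMaxD) N with
        | none => exact absurd hix (by simp [hNmem])
        | some k => exact ⟨k, rfl⟩
      obtain ⟨hklt, -, -⟩ := PySem.List.getElem_of_index?_eq_some hk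
      have hidx : aIdx xs = k := by unfold aIdx; rw [hnum, hk]; rfl
      have hMapp : (xs ++ [r]).map pyMaxD = xs.map pyMaxD ++ [pyMaxD r] := by simp
      have hmax' : PySem.List.max? ((xs ++ [r]).map pyMaxD) (fun x => x)
          = some (max N (pyMaxD r)) := by
        rw [hMapp, max?_id_append_singleton _ hMne (pyMaxD r), hN]; rfl
      have hIapp : (xs ++ [r]).map (fun row => pyIdxD row (pyMaxD row))
          = xs.map (fun row => pyIdxD row (pyMaxD row)) ++ [pyIdxD r (pyMaxD r)] := by simp
      by_cases hgt : pyMaxD r > N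
      · -- new row wins
        have hnum' : aNum (xs ++ [r]) = pyMaxD r := by
          unfold aNum; rw [hmax', max_eq_right (le_of_lt hgt)]; rfl
        have hnotmem : pyMaxD r ∉ xs.map pyMaxD :=
          fun hmem => absurd (hNmax _ hmem) (not_le.mpr hgt)
        have hidx' : aIdx (xs ++ [r]) = xs.length := by
          unfold aIdx
          rw [hnum', hMapp, PySem.List.index?_append_singleton_self _ _ hnotmem]
          simp
        have hcol' : aCol (xs ++ [r]) = pyIdxD r (pyMaxD r) := by
          unfold aCol
          rw [hidx', hIapp, PySem.List.pyGet?_natCast, List.getElem?_append_right (by simp)]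
          simp
        rw [hnum', hidx', hcol']
        simp only [PySem.List.enumerate, stepB, hnum, List.foldl_cons, List.foldl_nil]
        rw [if_pos hgt]
        norm_num
      · -- old best stays
        have hle : pyMaxD r ≤ N := not_lt.mp hgt
        have hnum' : aNum (xs ++ [r]) = N := by
          unfold aNum; rw [hmax', max_eq_left hle]; rfl
        have hidx' : aIdx (xs ++ [r]) = k := by
          unfold aIdx
          rw [hnum', hMapp, PySem.List.index?_append_of_mem _ hNmem, hk]; rfl
        have hcol' : aCol (xs ++ [r]) = aCol xs := by
          have hlen2 : k < (xs.map (fun row => pyIdxD row (pyMaxD row))).length := by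
            simpa using hklt
          unfold aCol
          rw [hidx', hidx, hIapp, PySem.List.pyGet?_natCast, PySem.List.pyGet?_natCast,
            List.getElem?_append_left hlen2]
        rw [hnum', hidx', hcol', hidx]
        simp only [PySem.List.enumerate, stepB, hnum, List.foldl_cons, List.foldl_nil]
        rw [if_neg hgt]

-- ===== VERDICT (by name: the statement is the Claim_ definition above) =====
theorem get_max_position_from_matrix_spec : Claim_equal_get_max_position_from_matrix := by
  intro matrix _ hpre
  unfold Spec_get_max_position_from_matrix
  unfold get_max_position_from_matrix get_max_position_from_matrix_alt
  have hb : (PySem.List.enumerate matrix 0).foldl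
      (fun (best : Option (Int × Int × Int)) p =>
        let m := pyMaxD p.2
        match best with
        | none => some (m, p.1, pyIdxD p.2 m)
        | some b => if m > b.1 then some (m, p.1, pyIdxD p.2 m) else some b)
      none = some (aNum matrix, (aIdx matrix : Int), aCol matrix) := by
    have := bfold_eq matrix hpre.1
    simpa [stepB] using this
  rw [foldA_eq, hb]
  simp [aNum, aIdx, aCol]
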